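-- pv_equiv track=rewrite | github.com/MPinkas/Who_s-code | Line_length_classfier.py | _sample_dist
-- ===== SOURCE A (Python) =====
-- def _sample_dist(x, y):
--     """
--     calculated the distance between 2 processed samples (distance is the distance between every 3 digits)
--
--     parameters
--     ----------
--     :param x: processed sample 1 (int)
--     :param y: processed sample 2 (int)
--     :return:
--     """
--     # todo consider a metric which ignores the order of lines of certain length
--     dist = 0
--     d_x = x
--     d_y = y
--     while True:
--         dist += abs((d_x % 1000) - (d_y % 1000))
--         d_x //= 1000
--         d_y //= 1000
--         if d_x == 0 and d_y == 0:
--             break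
--     return dist
-- ===== SOURCE B (Python) =====
-- def _sample_dist(x, y):
--     # phase 1: extract the base-1000 digit groups of each number (least significant first)
--     gx = _groups(x)
--     gy = _groups(y)
--     # phase 2: pad to equal length with zeros, then one summation pass
--     m = max(len(gx), len(gy))
--     gx = gx + [0] * (m - len(gx))
--     gy = gy + [0] * (m - len(gy))
--     return sum(abs(a - b) for a, b in zip(gx, gy))
--
--
-- def _groups(n):
--     out = []
--     while n > 0:
--         out.append(n % 1000)
--         n //= 1000
--     return out
-- ===== Notes on version B (the rewrite author's own statement) =====
-- stated objective: alternative
-- what changed: Replaces A's interleaved do-while loop (extract-and-accumulate in one pass over both numbers together) by a two-phase decomposition: first build each number's list of base-1000 groups separately, then zero-pad and sum absolute differences in a single separate zip pass.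
import Mathlib
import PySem

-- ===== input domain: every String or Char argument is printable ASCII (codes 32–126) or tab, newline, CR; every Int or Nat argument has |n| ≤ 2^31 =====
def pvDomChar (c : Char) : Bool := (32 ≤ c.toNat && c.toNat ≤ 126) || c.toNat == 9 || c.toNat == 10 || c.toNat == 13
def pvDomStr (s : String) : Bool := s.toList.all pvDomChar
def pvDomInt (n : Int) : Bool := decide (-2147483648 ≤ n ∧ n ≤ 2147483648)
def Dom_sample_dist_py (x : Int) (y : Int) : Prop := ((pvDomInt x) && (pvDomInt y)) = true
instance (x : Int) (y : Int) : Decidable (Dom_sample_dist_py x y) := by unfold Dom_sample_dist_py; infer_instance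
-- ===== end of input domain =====

-- B replaces A's single interleaved do-while loop by a two-phase decomposition (build both
-- base-1000 group lists, then zero-pad and sum absolute differences in one zip pass); same cost.

-- ===== PORT A =====
-- A's do-while loop; the fuel argument only makes the recursion total (on Pre_ the
-- loop always breaks before the fuel runs out; Python A never terminates on negative input).
def sampleDistLoopA (fuel : Nat) (dist d_x d_y : Int) : Int :=
  match fuel with
  | 0 => dist
  | fuel + 1 =>
    let dist := dist + |PySem.Int.mod d_x 1000 - PySem.Int.mod d_y 1000|
    let d_x := PySem.Int.floordiv d_x 1000
    let d_y := PySem.Int.floordiv d_y 1000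
    if d_x = 0 ∧ d_y = 0 then dist else sampleDistLoopA fuel dist d_x d_y

def sample_dist_py (x : Int) (y : Int) : Int :=
  sampleDistLoopA (x.toNat + y.toNat + 1) 0 x y

-- ===== PORT B =====
-- B's helper `_groups`: the base-1000 groups, least significant first.
def sampleDistGroups (n : Int) : List Int :=
  if _h : 0 < n then
    PySem.Int.mod n 1000 :: sampleDistGroups (PySem.Int.floordiv n 1000)
  else []
termination_by n.toNat
decreasing_by
  rw [PySem.Int.floordiv_eq_ediv_of_pos (by omega)]
  omega

def sample_dist_py_alt (x : Int) (y : Int) : Int :=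
  let gx := sampleDistGroups x
  let gy := sampleDistGroups y
  let m := max gx.length gy.length
  let gx := gx ++ List.replicate (m - gx.length) 0
  let gy := gy ++ List.replicate (m - gy.length) 0
  (gx.zip gy).foldl (fun s p => s + |p.1 - p.2|) 0

-- ===== PRECONDITION & SPEC =====
-- Pre_ excludes negative x or y: there Python A's do-while never reaches d_x == d_y == 0
-- (floor division drives a negative number to -1 and keeps it there), so A diverges.
def Pre_sample_dist_py (x : Int) (y : Int) : Prop := 0 ≤ x ∧ 0 ≤ y
instance (x : Int) (y : Int) : Decidable (Pre_sample_dist_py x y) := by unfold Pre_sample_dist_py; infer_instance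
def pvWitness_sample_dist_py : Int × Int := (1234567, 2006)

def Spec_sample_dist_py (x : Int) (y : Int) (out : Int) : Prop := out = sample_dist_py_alt x y
instance (x : Int) (y : Int) (out : Int) : Decidable (Spec_sample_dist_py x y out) := by unfold Spec_sample_dist_py; infer_instance

-- ===== CLAIM (what is proved, stated in full; the proofs are below) =====
def Claim_equal_sample_dist_py : Prop := ∀ (x : Int) (y : Int), Dom_sample_dist_py x y → Pre_sample_dist_py x y → Spec_sample_dist_py x y (sample_dist_py x y)

-- ===== LEMMAS AND PROOFS =====

-- Recursive characterisation of B's zip-pad-sum phase.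
def sZ : List Int → List Int → Int
  | [], [] => 0
  | x :: xs, [] => |x| + sZ xs []
  | [], y :: ys => |y| + sZ [] ys
  | x :: xs, y :: ys => |x - y| + sZ xs ys

theorem foldl_absadd (l : List (Int × Int)) (s : Int) :
    l.foldl (fun (s : Int) (p : Int × Int) => s + |p.1 - p.2|) s = s + l.foldl (fun (s : Int) (p : Int × Int) => s + |p.1 - p.2|) 0 := by
  induction l generalizing s with
  | nil => simp
  | cons p l ih =>
    simp only [List.foldl_cons]
    rw [ih, ih (0 + _)]
    ring

theorem padzip_left (b : List Int) :
    ((List.replicate b.length (0 : Int)).zip b).foldl (fun (s : Int) (p : Int × Int) => s + |p.1 - p.2|) 0 = sZ [] b := by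
  induction b with
  | nil => simp [sZ]
  | cons y ys ih =>
    simp only [List.length_cons, List.replicate_succ, List.zip_cons_cons, List.foldl_cons, sZ]
    rw [foldl_absadd, ih]
    simp

theorem padzip_right (a : List Int) :
    ((a).zip (List.replicate a.length (0 : Int))).foldl (fun (s : Int) (p : Int × Int) => s + |p.1 - p.2|) 0 = sZ a [] := by
  induction a with
  | nil => simp [sZ]
  | cons x xs ih =>
    simp only [List.length_cons, List.replicate_succ, List.zip_cons_cons, List.foldl_cons, sZ]
    rw [foldl_absadd, ih]
    simp

theorem padzip (a b : List Int) :
    ((a ++ List.replicate (max a.length b.length - a.length) 0).zip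
     (b ++ List.replicate (max a.length b.length - b.length) 0)).foldl
       (fun (s : Int) (p : Int × Int) => s + |p.1 - p.2|) 0 = sZ a b := by
  induction a generalizing b with
  | nil =>
    cases b with
    | nil => simp [sZ]
    | cons y ys =>
      simp only [List.nil_append, List.length_nil, List.length_cons, Nat.zero_max,
        Nat.sub_self, List.replicate_zero, List.append_nil, Nat.sub_zero]
      exact padzip_left (y :: ys)
  | cons x xs ih =>
    cases b with
    | nil =>
      simp only [List.nil_append, List.length_nil, List.length_cons, Nat.max_zero,
        Nat.sub_self, List.replicate_zero, List.append_nil, Nat.sub_zero]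
      exact padzip_right (x :: xs)
    | cons y ys =>
      have h1 : max (xs.length + 1) (ys.length + 1) - (xs.length + 1)
          = max xs.length ys.length - xs.length := by omega
      have h2 : max (xs.length + 1) (ys.length + 1) - (ys.length + 1)
          = max xs.length ys.length - ys.length := by omega
      simp only [List.length_cons, List.cons_append, List.zip_cons_cons, List.foldl_cons, h1, h2]
      rw [foldl_absadd, ih]
      simp [sZ]

-- sample_dist_py_alt computed via sZ
theorem alt_eq_sZ (x y : Int) :
    sample_dist_py_alt x y = sZ (sampleDistGroups x) (sampleDistGroups y) := by
  unfold sample_dist_py_alt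
  exact padzip _ _

theorem groups_pos (n : Int) (h : 0 < n) :
    sampleDistGroups n
      = PySem.Int.mod n 1000 :: sampleDistGroups (PySem.Int.floordiv n 1000) := by
  rw [sampleDistGroups]; simp [h]

theorem groups_nonpos (n : Int) (h : ¬ 0 < n) : sampleDistGroups n = [] := by
  rw [sampleDistGroups]; simp [h]

theorem groups_zero : sampleDistGroups 0 = [] := groups_nonpos 0 (by omega)

-- one step of the base-1000 peeling, matched by sZ
theorem sZ_step (dx dy : Int) (hx : 0 ≤ dx) (hy : 0 ≤ dy) :
    sZ (sampleDistGroups dx) (sampleDistGroups dy)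
      = |PySem.Int.mod dx 1000 - PySem.Int.mod dy 1000|
        + sZ (sampleDistGroups (PySem.Int.floordiv dx 1000))
             (sampleDistGroups (PySem.Int.floordiv dy 1000)) := by
  rcases lt_or_eq_of_le hx with hx' | hx' <;> rcases lt_or_eq_of_le hy with hy' | hy'
  · rw [groups_pos dx hx', groups_pos dy hy']
    simp [sZ]
  · rw [groups_pos dx hx', groups_nonpos dy (by omega)]
    have hm : PySem.Int.mod dy 1000 = 0 := by
      rw [PySem.Int.mod_eq_emod_of_pos (by omega), ← hy']; rfl
    have hd : PySem.Int.floordiv dy 1000 = 0 := by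
      rw [PySem.Int.floordiv_eq_ediv_of_pos (by omega), ← hy']; rfl
    rw [hm, hd, groups_zero]
    have hmx : 0 ≤ PySem.Int.mod dx 1000 := by
      rw [PySem.Int.mod_eq_emod_of_pos (by omega)]; exact Int.emod_nonneg _ (by omega)
    simp [sZ]
  · rw [groups_nonpos dx (by omega), groups_pos dy hy']
    have hm : PySem.Int.mod dx 1000 = 0 := by
      rw [PySem.Int.mod_eq_emod_of_pos (by omega), ← hx']; rfl
    have hd : PySem.Int.floordiv dx 1000 = 0 := by
      rw [PySem.Int.floordiv_eq_ediv_of_pos (by omega), ← hx']; rfl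
    rw [hm, hd, groups_zero]
    have hmy : 0 ≤ PySem.Int.mod dy 1000 := by
      rw [PySem.Int.mod_eq_emod_of_pos (by omega)]; exact Int.emod_nonneg _ (by omega)
    simp [sZ]
  · have hm : PySem.Int.mod dx 1000 = 0 := by
      rw [PySem.Int.mod_eq_emod_of_pos (by omega), ← hx']; rfl
    have hm' : PySem.Int.mod dy 1000 = 0 := by
      rw [PySem.Int.mod_eq_emod_of_pos (by omega), ← hy']; rfl
    have hd : PySem.Int.floordiv dx 1000 = 0 := by
      rw [PySem.Int.floordiv_eq_ediv_of_pos (by omega), ← hx']; rfl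
    have hd' : PySem.Int.floordiv dy 1000 = 0 := by
      rw [PySem.Int.floordiv_eq_ediv_of_pos (by omega), ← hy']; rfl
    rw [hm, hm', hd, hd', ← hx', ← hy', groups_zero]
    simp [sZ]

theorem ediv1000_lt (a : Int) (h : 0 < a) : a / 1000 < a := by
  have hle := Int.ediv_le_self 1000 h.le
  have h1 : a / 1000 ≠ a := by
    intro he
    have hdm := Int.mul_ediv_add_emod a 1000
    have hm := Int.emod_nonneg a (by omega : (1000:Int) ≠ 0)
    have hm2 := Int.emod_lt_of_pos a (by omega : (0:Int) < 1000)
    nlinarith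
  omega

-- the loop of A computes dist + sZ of the group lists, for sufficient fuel
theorem loopA_eq (fuel : Nat) :
    ∀ (dx dy dist : Int), 0 ≤ dx → 0 ≤ dy → dx.toNat + dy.toNat < fuel →
      sampleDistLoopA fuel dist dx dy
        = dist + sZ (sampleDistGroups dx) (sampleDistGroups dy) := by
  induction fuel with
  | zero => intro dx dy dist _ _ hcz; omega
  | succ f ih =>
    intro dx dy dist hx hy hf
    rw [sampleDistLoopA]
    set t := |PySem.Int.mod dx 1000 - PySem.Int.mod dy 1000| with ht
    have hdx : PySem.Int.floordiv dx 1000 = dx / 1000 :=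
      PySem.Int.floordiv_eq_ediv_of_pos (by omega)
    have hdy : PySem.Int.floordiv dy 1000 = dy / 1000 :=
      PySem.Int.floordiv_eq_ediv_of_pos (by omega)
    have hx' : 0 ≤ dx / 1000 := Int.ediv_nonneg hx (by omega)
    have hy' : 0 ≤ dy / 1000 := Int.ediv_nonneg hy (by omega)
    split_ifs with hb
    · -- break: both quotients zero
      rw [sZ_step dx dy hx hy, hdx, hdy]
      rw [hdx, hdy] at hb
      rw [hb.1, hb.2, groups_zero]
      simp [sZ, ht]
    · -- continue
      rw [hdx, hdy]
      have hlt : (dx / 1000).toNat + (dy / 1000).toNat < f := by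
        rw [hdx, hdy] at hb
        have hxle : (dx / 1000).toNat ≤ dx.toNat := by
          have := Int.ediv_le_self 1000 hx
          omega
        have hyle : (dy / 1000).toNat ≤ dy.toNat := by
          have := Int.ediv_le_self 1000 hy
          omega
        rcases Decidable.em (dx / 1000 = 0) with h0 | h0
        · have hyne : dy / 1000 ≠ 0 := fun h => hb ⟨h0, h⟩
          have := ediv1000_lt dy (by omega)
          omega
        · have := ediv1000_lt dx (by omega)
          omega
      rw [ih _ _ _ hx' hy' hlt]
      rw [sZ_step dx dy hx hy, hdx, hdy]
      ring

-- ===== VERDICT (by name: the statement is the Claim_ definition above) =====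
theorem sample_dist_py_spec : Claim_equal_sample_dist_py := by
  intro x y _ hpre
  unfold Spec_sample_dist_py sample_dist_py
  rw [loopA_eq _ x y 0 hpre.1 hpre.2 (by omega), alt_eq_sZ]
  ring
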